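-- pv_equiv track=rewrite | github.com/kjg2711/algorithm-24 | 프로젝트/search.py | horspool_string_matching
-- ===== SOURCE A (Python) =====
-- def horspool_string_matching(text, pattern):
--     pattern_length = len(pattern)
--     text_length = len(text)
--     matches = []
--
--     if pattern_length > text_length:
--         return matches
--
--     bad_character = {pattern[i]: pattern_length - i - 1 for i in range(pattern_length - 1)}
--
--     i = pattern_length - 1
--     while i < text_length:
--         j = pattern_length - 1
--         k = i
--         while j >= 0 and text[k] == pattern[j]:
--             k -= 1
--             j -= 1
--         if j < 0:
--             matches.append(k + 1)
--             i += pattern_length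
--         else:
--             i += bad_character.get(text[i], pattern_length)
--
--     return matches
-- ===== SOURCE B (Python) =====
-- def horspool_string_matching(text, pattern):
--     matches = []
--     s = 0
--     limit = len(text) - len(pattern)
--     while s <= limit:
--         if text.startswith(pattern, s):
--             matches.append(s)
--             s += len(pattern)
--         else:
--             s += 1
--     return matches
-- ===== Notes on version B (the rewrite author's own statement) =====
-- stated objective: simpler
-- what changed: Replaces Horspool's bad-character shift table and right-to-left window comparison by a plain left-to-right greedy scan that tests each alignment with str.startswith and jumps by the pattern length after a match.
import Mathlib
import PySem

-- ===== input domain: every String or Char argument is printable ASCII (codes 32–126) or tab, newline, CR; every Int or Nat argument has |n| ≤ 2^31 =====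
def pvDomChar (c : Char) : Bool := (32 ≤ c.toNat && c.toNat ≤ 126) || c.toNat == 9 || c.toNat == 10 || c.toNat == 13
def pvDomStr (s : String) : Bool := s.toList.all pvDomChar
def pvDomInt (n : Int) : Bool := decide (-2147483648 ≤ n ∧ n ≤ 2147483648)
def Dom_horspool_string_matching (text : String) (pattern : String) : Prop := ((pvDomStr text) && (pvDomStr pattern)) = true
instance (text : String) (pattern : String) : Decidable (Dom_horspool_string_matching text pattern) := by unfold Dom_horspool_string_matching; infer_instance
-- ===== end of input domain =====

-- B replaces Horspool's bad-character table and right-to-left window comparison by a plain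
-- left-to-right greedy startswith scan (objective: simpler; same worst-case cost, measured faster
-- by a constant factor: the per-alignment comparison is a single C-level str.startswith call).


-- ===== PORT A =====
-- inner `while j >= 0 and text[k] == pattern[j]`: fuel ≥ j+2 makes it total; in Python both
-- indexings are always in range here, a `none` lookup exits the loop (unreachable state).
def hspInner (t p : List Char) : Nat → Int → Int → Int × Int
  | 0, j, k => (j, k)
  | fuel + 1, j, k =>
    if j < 0 then (j, k)
    else
      match PySem.List.pyGet? t k, PySem.List.pyGet? p j with
      | some a, some c => if a = c then hspInner t p fuel (j - 1) (k - 1) else (j, k)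
      | _, _ => (j, k)

-- outer `while i < text_length`: fuel ≥ n+1 suffices whenever pattern ≠ "" (each step grows i
-- by ≥ 1); for pattern = "" Python loops forever (excluded by Pre_) and the fuel runs out.
-- text[i] in the shift lookup is always in range here (pyGetD with an unreachable default).
def hspOuter (t p : List Char) (bc : PySem.Dict Char Int) (m n : Int) : Nat → Int → List Int
  | 0, _ => []
  | fuel + 1, i =>
    if i < n then
      let r := hspInner t p (p.length + 1) (m - 1) i
      if r.1 < 0 then (r.2 + 1) :: hspOuter t p bc m n fuel (i + m)
      else hspOuter t p bc m n fuel (i + ((bc.get? (PySem.List.pyGetD t i ' ')).getD m))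
    else []

def horspool_string_matching (text : String) (pattern : String) : List Int :=
  let t := text.toList
  let p := pattern.toList
  let m : Int := p.length
  let n : Int := t.length
  if m > n then []
  else
    -- {pattern[i]: pattern_length - i - 1 for i in range(pattern_length - 1)}  (i in range)
    let bc : PySem.Dict Char Int :=
      (PySem.List.pyRange 0 (m - 1) 1).foldl
        (fun d i => d.insert (PySem.List.pyGetD p i ' ') (m - i - 1)) PySem.Dict.empty
    hspOuter t p bc m n (t.length + 1) (m - 1)

-- ===== PORT B =====
-- `while s <= limit`: fuel ≥ n+1 suffices whenever pattern ≠ "" (s grows by ≥ 1 each step).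
-- `text.startswith(pattern, s)` is ported as startswith on (drop s.toNat): exact for 0 ≤ s,
-- and s starts at 0 and only increases.
def altLoop (t p : List Char) (limit : Int) : Nat → Int → List Int
  | 0, _ => []
  | fuel + 1, s =>
    if s ≤ limit then
      if PySem.Chars.startswith (t.drop s.toNat) p then
        s :: altLoop t p limit fuel (s + p.length)
      else altLoop t p limit fuel (s + 1)
    else []

def horspool_string_matching_alt (text : String) (pattern : String) : List Int :=
  let t := text.toList
  let p := pattern.toList
  altLoop t p ((t.length : Int) - p.length) (t.length + 1) 0

-- ===== PRECONDITION & SPEC =====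
-- Pre_ excludes the empty pattern: there Python A loops forever (the zero shift never
-- advances the window), and B's loop never advances either.
def Pre_horspool_string_matching (text : String) (pattern : String) : Prop := pattern ≠ ""
instance (text : String) (pattern : String) : Decidable (Pre_horspool_string_matching text pattern) := by unfold Pre_horspool_string_matching; infer_instance

def pvWitness_horspool_string_matching : String × String := ("abracadabra", "abra")

def Spec_horspool_string_matching (text : String) (pattern : String) (out : List Int) : Prop := out = horspool_string_matching_alt text pattern
instance (text : String) (pattern : String) (out : List Int) : Decidable (Spec_horspool_string_matching text pattern out) := by unfold Spec_horspool_string_matching; infer_instance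

-- ===== CLAIM (what is proved, stated in full; the proofs are below) =====
def Claim_equal_horspool_string_matching : Prop := ∀ (text : String) (pattern : String), Dom_horspool_string_matching text pattern → Pre_horspool_string_matching text pattern → Spec_horspool_string_matching text pattern (horspool_string_matching text pattern)

-- ===== LEMMAS AND PROOFS =====

-- `greedy t p s` = the greedy non-overlapping match positions from alignment s on: the common
-- specification both loops are proved equal to.
def greedy (t p : List Char) (s : Nat) : List Int :=
  if _hm : p.length = 0 then []
  else
    if _hn : s + p.length ≤ t.length then
      if p <+: t.drop s then (s : Int) :: greedy t p (s + p.length)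
      else greedy t p (s + 1)
    else []
termination_by t.length - s
decreasing_by all_goals omega

lemma prefix_iff_forall (l p : List Char) :
    p <+: l ↔ p.length ≤ l.length ∧ ∀ r : Nat, r < p.length → p[r]? = l[r]? := by
  constructor
  · intro h
    refine ⟨h.length_le, fun r hr => ?_⟩
    rw [List.prefix_iff_eq_take] at h
    rw [h]
    simp [List.getElem?_take, hr]
  · rintro ⟨hl, hall⟩
    rw [List.prefix_iff_eq_take]
    apply List.ext_getElem?
    intro r
    by_cases hr : r < p.length
    · rw [hall r hr]; simp [List.getElem?_take, hr]
    · rw [List.getElem?_eq_none (by omega), List.getElem?_eq_none (by simp; omega)]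

lemma prefix_drop_iff (t p : List Char) (s : Nat) (hm : p.length ≠ 0) :
    p <+: t.drop s ↔ s + p.length ≤ t.length ∧ ∀ r : Nat, r < p.length → p[r]? = t[s + r]? := by
  rw [prefix_iff_forall]
  simp only [List.length_drop, List.getElem?_drop]
  constructor
  · rintro ⟨h1, h2⟩; exact ⟨by omega, h2⟩
  · rintro ⟨h1, h2⟩; exact ⟨by omega, h2⟩


lemma greedy_overflow (t p : List Char) (s : Nat) (h : t.length < s + p.length) :
    greedy t p s = [] := by
  rw [greedy]
  split_ifs <;> first | rfl | omega

lemma greedy_match (t p : List Char) (s : Nat) (hm : p.length ≠ 0)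
    (hn : s + p.length ≤ t.length) (hp : p <+: t.drop s) :
    greedy t p s = (s : Int) :: greedy t p (s + p.length) := by
  rw [greedy]; split_ifs <;> first | rfl | omega | tauto

lemma greedy_step (t p : List Char) (s : Nat) (hm : p.length ≠ 0)
    (hp : ¬ p <+: t.drop s) :
    greedy t p s = greedy t p (s + 1) := by
  by_cases hn : s + p.length ≤ t.length
  · rw [greedy]; split_ifs <;> first | rfl | omega | tauto
  · rw [greedy_overflow t p s (by omega), greedy_overflow t p (s+1) (by omega)]

lemma greedy_skip (t p : List Char) (hm : p.length ≠ 0) (d : Nat) :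
    ∀ s : Nat, (∀ u : Nat, s ≤ u → u < s + d → ¬ p <+: t.drop u) →
    greedy t p s = greedy t p (s + d) := by
  induction d with
  | zero => intro s _; rfl
  | succ d ih =>
    intro s h
    rw [greedy_step t p s hm (h s le_rfl (by omega))]
    rw [ih (s + 1) (fun u hu1 hu2 => h u (by omega) (by omega))]
    congr 1; omega

lemma altLoop_eq (t p : List Char) (hm : p.length ≠ 0) :
    ∀ (fuel : Nat) (s : Int), 0 ≤ s → (t.length : Int) - s < fuel →
    altLoop t p ((t.length : Int) - p.length) fuel s = greedy t p s.toNat := by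
  intro fuel
  induction fuel with
  | zero =>
    intro s hs hf
    rw [altLoop, greedy_overflow t p s.toNat (by omega)]
  | succ fuel ih =>
    intro s hs hf
    rw [altLoop]
    by_cases hlim : s ≤ (t.length : Int) - p.length
    · rw [if_pos hlim]
      by_cases hpre : p <+: t.drop s.toNat
      · rw [if_pos ((PySem.Chars.startswith_iff _ _).2 hpre),
          greedy_match t p s.toNat hm (by omega) hpre,
          ih (s + p.length) (by omega) (by omega)]
        congr 2
        · omega
        · congr 1; omega
      · rw [if_neg (by rw [PySem.Chars.startswith_iff]; exact hpre),
          greedy_step t p s.toNat hm hpre, ih (s + 1) (by omega) (by omega)]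
        congr 1; omega
    · rw [if_neg hlim, greedy_overflow t p s.toNat (by omega)]

lemma hspInner_spec (t p : List Char) (s : Nat) (hm : p.length ≠ 0)
    (hsm : s + p.length ≤ t.length) :
    ∀ (fuel : Nat) (j : Int), -1 ≤ j → j < p.length → j + 2 ≤ (fuel : Int) →
    (∀ r : Nat, j < (r : Int) → r < p.length → p[r]? = t[s + r]?) →
    (0 ≤ (hspInner t p fuel j ((s : Int) + j)).1 → ¬ p <+: t.drop s) ∧
    ((hspInner t p fuel j ((s : Int) + j)).1 < 0 →
      (hspInner t p fuel j ((s : Int) + j)).2 = (s : Int) - 1 ∧ p <+: t.drop s) := by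
  intro fuel
  induction fuel with
  | zero => intro j hj1 hj2 hjf; omega
  | succ fuel ih =>
    intro j hj1 hj2 hjf hmatched
    rw [hspInner]
    by_cases hjneg : j < 0
    · rw [if_pos hjneg]
      have hpre : p <+: t.drop s := by
        rw [prefix_drop_iff t p s hm]
        exact ⟨hsm, fun r hr => hmatched r (by omega) hr⟩
      exact ⟨fun h0 => absurd h0 (by simp; omega), fun _ => ⟨by simp; omega, hpre⟩⟩
    · rw [if_neg hjneg]
      have hkr : PySem.List.pyGet? t ((s : Int) + j) = some t[((s : Int) + j).toNat] :=
        PySem.List.pyGet?_eq_some_getElem _ (by omega) (by push_cast; omega)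
      have hjr : PySem.List.pyGet? p j = some p[j.toNat] :=
        PySem.List.pyGet?_eq_some_getElem _ (by omega) (by push_cast; omega)
      rw [hkr, hjr]
      dsimp only
      by_cases heq : t[((s : Int) + j).toNat] = p[j.toNat]
      · rw [if_pos heq]
        have step : ∀ r : Nat, j - 1 < (r : Int) → r < p.length → p[r]? = t[s + r]? := by
          intro r hr1 hr2
          by_cases hrj : (r : Int) = j
          · have : r = j.toNat := by omega
            subst this
            have : s + j.toNat = ((s : Int) + j).toNat := by omega
            rw [List.getElem?_eq_getElem (by omega), List.getElem?_eq_getElem (by omega)]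
            simp only [this]
            exact congrArg some heq.symm
          · exact hmatched r (by omega) hr2
        have := ih (j - 1) (by omega) (by omega) (by omega) step
        have hk1 : (s : Int) + (j - 1) = (s : Int) + j - 1 := by omega
        rwa [hk1] at this
      · rw [if_neg heq]
        refine ⟨fun _ hpre => ?_, fun h0 => by omega⟩
        rw [prefix_drop_iff t p s hm] at hpre
        have := hpre.2 j.toNat (by omega)
        rw [List.getElem?_eq_getElem (by omega), List.getElem?_eq_getElem (by omega)] at this
        apply heq
        have hst : s + j.toNat = ((s : Int) + j).toNat := by omega
        simp only [hst] at this
        exact (Option.some_injective _ this).symm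

lemma bc_fold_spec (p : List Char) (k : Nat) (c : Char) :
    (((List.map (fun x : Nat => (x : Int)) (List.range k)).foldl
        (fun d i => d.insert (PySem.List.pyGetD p i ' ') ((p.length : Int) - i - 1))
        PySem.Dict.empty).get? c = none → ∀ j : Nat, j < k → p.getD j ' ' ≠ c) ∧
    (∀ v, ((List.map (fun x : Nat => (x : Int)) (List.range k)).foldl
        (fun d i => d.insert (PySem.List.pyGetD p i ' ') ((p.length : Int) - i - 1))
        PySem.Dict.empty).get? c = some v →
      ∃ j : Nat, j < k ∧ p.getD j ' ' = c ∧ v = (p.length : Int) - 1 - j ∧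
        ∀ j' : Nat, j < j' → j' < k → p.getD j' ' ' ≠ c) := by
  induction k with
  | zero =>
    simp [PySem.Dict.get?_empty]
  | succ k ih =>
    rw [List.range_succ, List.map_append, List.foldl_append]
    simp only [List.map_cons, List.map_nil, List.foldl_cons, List.foldl_nil]
    rw [PySem.Dict.get?_insert, PySem.List.pyGetD_natCast]
    by_cases hc : c = p.getD k ' '
    · rw [if_pos hc]
      refine ⟨fun h => by simp at h, fun v hv => ?_⟩
      refine ⟨k, by omega, hc.symm, by simp at hv; omega, fun j' h1 h2 => by omega⟩
    · rw [if_neg hc]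
      refine ⟨fun h j hj => ?_, fun v hv => ?_⟩
      · by_cases hjk : j = k
        · subst hjk; exact fun he => hc he.symm
        · exact ih.1 h j (by omega)
      · obtain ⟨j, hj1, hj2, hj3, hj4⟩ := ih.2 v hv
        refine ⟨j, by omega, hj2, hj3, fun j' h1 h2 => ?_⟩
        by_cases hjk : j' = k
        · subst hjk; exact fun he => hc he.symm
        · exact hj4 j' h1 (by omega)

lemma shift_spec (p : List Char) (hm : p.length ≠ 0) (c : Char) :
    1 ≤ (((PySem.List.pyRange 0 ((p.length : Int) - 1) 1).foldl
          (fun d i => d.insert (PySem.List.pyGetD p i ' ') ((p.length : Int) - i - 1))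
          PySem.Dict.empty).get? c).getD (p.length : Int) ∧
    (((PySem.List.pyRange 0 ((p.length : Int) - 1) 1).foldl
          (fun d i => d.insert (PySem.List.pyGetD p i ' ') ((p.length : Int) - i - 1))
          PySem.Dict.empty).get? c).getD (p.length : Int) ≤ (p.length : Int) ∧
    ∀ d : Nat, 1 ≤ d →
      (d : Int) < (((PySem.List.pyRange 0 ((p.length : Int) - 1) 1).foldl
          (fun d i => d.insert (PySem.List.pyGetD p i ' ') ((p.length : Int) - i - 1))
          PySem.Dict.empty).get? c).getD (p.length : Int) →
      p[p.length - 1 - d]? ≠ some c := by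
  have hcast : (p.length : Int) - 1 = ((p.length - 1 : Nat) : Int) := by omega
  rw [hcast, PySem.List.pyRange_zero_natCast]
  have hspec := bc_fold_spec p (p.length - 1) c
  cases hget : ((List.map (fun x : Nat => (x : Int)) (List.range (p.length - 1))).foldl
      (fun d i => d.insert (PySem.List.pyGetD p i ' ') ((p.length : Int) - i - 1))
      PySem.Dict.empty).get? c with
  | none =>
    refine ⟨by simp; omega, by simp, fun d hd1 hd2 => ?_⟩
    simp only [Option.getD_none] at hd2
    have hj : p.length - 1 - d < p.length - 1 := by omega
    have := hspec.1 hget (p.length - 1 - d) hj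
    intro he
    apply this
    have : p.getD (p.length - 1 - d) ' ' = c := by
      rw [List.getD_eq_getElem?_getD, he]; rfl
    exact this
  | some v =>
    obtain ⟨j, hj1, hj2, hj3, hj4⟩ := hspec.2 v hget
    subst hj3
    refine ⟨by simp; omega, by simp; omega, fun d hd1 hd2 => ?_⟩
    simp only [Option.getD_some] at hd2
    have hj' : j < p.length - 1 - d ∧ p.length - 1 - d < p.length - 1 := by omega
    have := hj4 (p.length - 1 - d) hj'.1 hj'.2
    intro he
    apply this
    rw [List.getD_eq_getElem?_getD, he]; rfl

lemma no_match_in_shift (t p : List Char) (hm : p.length ≠ 0) (s : Nat) (i : Int)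
    (hi : (i : Int) = (s : Int) + (p.length : Int) - 1) (hin : i < (t.length : Int))
    (c : Char) (hc : c = t[i.toNat]'(by omega))
    (shift : Int) (hsh1 : 1 ≤ shift) (hsh2 : shift ≤ (p.length : Int))
    (hsh3 : ∀ d : Nat, 1 ≤ d → (d : Int) < shift → p[p.length - 1 - d]? ≠ some c)
    (hs0 : ¬ p <+: t.drop s) :
    ∀ u : Nat, s ≤ u → u < s + shift.toNat → ¬ p <+: t.drop u := by
  intro u hu1 hu2 hpre
  by_cases hus : u = s
  · exact hs0 (hus ▸ hpre)
  · set d : Nat := u - s with hd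
    have hd1 : 1 ≤ d := by omega
    have hd2 : (d : Int) < shift := by omega
    rw [prefix_drop_iff t p u hm] at hpre
    have hr : p.length - 1 - d < p.length := by omega
    have := hpre.2 (p.length - 1 - d) hr
    apply hsh3 d hd1 hd2
    rw [this]
    have hidx : u + (p.length - 1 - d) = i.toNat := by omega
    rw [hidx, hc]
    rw [List.getElem?_eq_getElem (by omega)]

lemma hspOuter_eq (t p : List Char) (bc : PySem.Dict Char Int) (hm : p.length ≠ 0)
    (hbc : ∀ c : Char, 1 ≤ (bc.get? c).getD (p.length : Int) ∧
      (bc.get? c).getD (p.length : Int) ≤ (p.length : Int) ∧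
      ∀ d : Nat, 1 ≤ d → (d : Int) < (bc.get? c).getD (p.length : Int) →
        p[p.length - 1 - d]? ≠ some c) :
    ∀ (fuel : Nat) (i : Int), (p.length : Int) - 1 ≤ i → (t.length : Int) - i < fuel →
    hspOuter t p bc (p.length : Int) (t.length : Int) fuel i
      = greedy t p (i - (p.length : Int) + 1).toNat := by
  intro fuel
  induction fuel with
  | zero =>
    intro i hi hf
    rw [hspOuter, greedy_overflow t p _ (by omega)]
  | succ fuel ih =>
    intro i hi hf
    rw [hspOuter]
    by_cases hin : i < (t.length : Int)
    · rw [if_pos hin]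
      set s : Nat := (i - (p.length : Int) + 1).toNat with hsdef
      have hsi : (s : Int) = i - (p.length : Int) + 1 := by omega
      have hsm : s + p.length ≤ t.length := by omega
      have hkinit : i = (s : Int) + ((p.length : Int) - 1) := by omega
      have hspec := hspInner_spec t p s hm hsm (p.length + 1) ((p.length : Int) - 1)
        (by omega) (by omega) (by push_cast; omega)
        (fun r hr1 hr2 => absurd hr2 (by omega))
      rw [← hkinit] at hspec
      dsimp only
      by_cases hneg : (hspInner t p (p.length + 1) ((p.length : Int) - 1) i).1 < 0
      · rw [if_pos hneg]
        obtain ⟨hk, hpre⟩ := hspec.2 hneg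
        rw [hk, greedy_match t p s hm hsm hpre]
        congr 1
        · omega
        · rw [ih _ (by omega) (by omega)]
          congr 1
          omega
      · rw [if_neg hneg]
        have hnopre := hspec.1 (by omega)
        have hgetd : PySem.List.pyGetD t i ' ' = t[i.toNat]'(by omega) :=
          PySem.List.pyGetD_eq_getElem t ' ' (by omega) (by omega)
        set c : Char := t[i.toNat]'(by omega) with hcdef
        set shift : Int := (bc.get? c).getD (p.length : Int) with hshiftdef
        obtain ⟨hsh1, hsh2, hsh3⟩ := hbc c
        have hskip := no_match_in_shift t p hm s i (by omega) (by omega) c rfl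
          shift hsh1 hsh2 hsh3 hnopre
        rw [hgetd]
        rw [ih _ (by omega) (by omega)]
        have harg : (i + (bc.get? c).getD (p.length : Int) - (p.length : Int) + 1).toNat
            = s + shift.toNat := by omega
        rw [harg, ← greedy_skip t p hm shift.toNat s hskip]
    · rw [if_neg hin, greedy_overflow t p _ (by omega)]

-- ===== VERDICT (by name: the statement is the Claim_ definition above) =====
theorem horspool_string_matching_spec : Claim_equal_horspool_string_matching := by
  intro text pattern _hdom hpre
  unfold Spec_horspool_string_matching
  unfold horspool_string_matching horspool_string_matching_alt
  dsimp only
  set t := text.toList with ht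
  set p := pattern.toList with hp
  have hpm : p.length ≠ 0 := by
    simp only [hp, ne_eq, List.length_eq_zero_iff, String.toList_eq_nil_iff]
    exact hpre
  rw [altLoop_eq t p hpm (t.length + 1) 0 le_rfl (by push_cast; omega)]
  simp only [Int.toNat_zero]
  by_cases hmn : (p.length : Int) > (t.length : Int)
  · rw [if_pos hmn, greedy_overflow t p 0 (by omega)]
  · rw [if_neg hmn,
      hspOuter_eq t p _ hpm (fun c => shift_spec p hpm c) (t.length + 1)
        ((p.length : Int) - 1) le_rfl (by push_cast; omega)]
    congr 1
    omega
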